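-- pv_equiv track=rewrite | github.com/Eneri463/SMTP-client | SMTP_POP3.py | messageSMTP
-- ===== SOURCE A (Python) =====
-- def messageSMTP(message):
--
--     elem = message.split("\n")
--
--     new_message = ""
--
--     for i in range(len(elem)):
--         if elem[i] == '.':
--             new_message = new_message + "..\n"
--         else:
--             new_message = new_message + elem[i] + "\n"
--
--     return new_message
-- ===== SOURCE B (Python) =====
-- def messageSMTP(message):
--     # single pass over characters with a tiny state machine:
--     # state 0 = current line empty, 1 = current line is exactly ".", 2 = anything else
--     out = []
--     state = 0
--     for ch in message:
--         if ch == "\n":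
--             if state == 1:
--                 out.append(".")
--             out.append("\n")
--             state = 0
--         else:
--             out.append(ch)
--             if state == 0 and ch == ".":
--                 state = 1
--             else:
--                 state = 2
--     if state == 1:
--         out.append(".")
--     out.append("\n")
--     return "".join(out)
-- ===== Notes on version B (the rewrite author's own statement) =====
-- stated objective: alternative
-- what changed: Replaced split-into-lines plus index loop with repeated string concatenation by a single character-level pass driven by a three-state machine (line-empty / line-is-dot / other) that appends pieces to a list and joins once.
import Mathlib
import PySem

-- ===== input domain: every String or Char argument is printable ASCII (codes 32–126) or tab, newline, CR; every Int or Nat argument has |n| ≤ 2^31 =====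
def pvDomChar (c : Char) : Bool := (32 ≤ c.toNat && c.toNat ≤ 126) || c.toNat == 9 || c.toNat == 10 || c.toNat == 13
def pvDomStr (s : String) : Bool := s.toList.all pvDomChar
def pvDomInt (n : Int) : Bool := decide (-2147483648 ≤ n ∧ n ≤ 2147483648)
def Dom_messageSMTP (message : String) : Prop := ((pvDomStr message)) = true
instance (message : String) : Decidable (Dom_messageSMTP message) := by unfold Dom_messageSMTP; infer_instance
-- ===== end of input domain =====

-- B replaces A's split-into-lines + index loop + string concatenation by one
-- character-level pass with a three-state machine; same return value, no speed claim.

-- ===== PORT A =====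
-- message.split("\n") then a loop over range(len(elem)) building new_message
def messageSMTP (message : String) : String :=
  let elem := PySem.Chars.splitOn message.toList ['\n']
  let new_message :=
    (PySem.List.pyRange 0 (PySem.List.len elem)).foldl
      (fun acc i =>
        if PySem.List.pyGetD elem i [] = ['.'] then acc ++ ['.', '.', '\n']
        else acc ++ PySem.List.pyGetD elem i [] ++ ['\n'])
      []
  String.ofList new_message

-- ===== PORT B =====
-- one step of the state machine: state 0 = line empty, 1 = line is ".", 2 = other
def msgAltStep (p : List Char × Nat) (ch : Char) : List Char × Nat :=
  if ch = '\n' then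
    ((p.1 ++ (if p.2 = 1 then ['.'] else [])) ++ ['\n'], 0)
  else
    (p.1 ++ [ch], if p.2 = 0 ∧ ch = '.' then 1 else 2)

def messageSMTP_alt (message : String) : String :=
  let r := message.toList.foldl msgAltStep ([], 0)
  String.ofList ((r.1 ++ (if r.2 = 1 then ['.'] else [])) ++ ['\n'])

-- ===== PRECONDITION & SPEC =====
def Spec_messageSMTP (message : String) (out : String) : Prop := out = messageSMTP_alt message
instance (message : String) (out : String) : Decidable (Spec_messageSMTP message out) := by unfold Spec_messageSMTP; infer_instance

-- ===== CLAIM (what is proved, stated in full; the proofs are below) =====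
def Claim_equal_messageSMTP : Prop := ∀ (message : String), Dom_messageSMTP message → Spec_messageSMTP message (messageSMTP message)

-- ===== LEMMAS AND PROOFS =====

-- the list of lines of cs, split at '\n' (as Python's split("\n") produces them)
def pvLines (cs : List Char) : List (List Char) :=
  match h : cs.dropWhile (· ≠ '\n') with
  | [] => [cs]
  | _ :: rest => cs.takeWhile (· ≠ '\n') :: pvLines rest
termination_by cs.length
decreasing_by
  have h1 : (cs.dropWhile (· ≠ '\n')).length ≤ cs.length :=
    (List.dropWhile_sublist _).length_le
  rw [h] at h1; simp at h1; omega

-- what A emits for one line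
def pvG (h : List Char) : List Char :=
  if h = ['.'] then ['.', '.', '\n'] else h ++ ['\n']

-- prepend pre to the first element
def pvMerge (pre : List Char) : List (List Char) → List (List Char)
  | [] => [pre]
  | x :: xs => (pre ++ x) :: xs

lemma pvLines_ne_nil (cs : List Char) : pvLines cs ≠ [] := by
  rw [pvLines]
  split <;> simp

lemma pvMerge_nil (L : List (List Char)) (hL : L ≠ []) : pvMerge [] L = L := by
  cases L with
  | nil => exact absurd rfl hL
  | cons x xs => simp [pvMerge]

lemma pvMerge_merge (pre c : List Char) (L : List (List Char)) :
    pvMerge pre (pvMerge c L) = pvMerge (pre ++ c) L := by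
  cases L <;> simp [pvMerge]

lemma pvLines_newline (rest : List Char) :
    pvLines ('\n' :: rest) = [] :: pvLines rest := by
  have hd : List.dropWhile (fun x => decide ¬x = '\n') ('\n' :: rest) = '\n' :: rest := by
    rw [List.dropWhile_cons, if_neg (by simp)]
  rw [pvLines]
  split
  · next heq => rw [hd] at heq; cases heq
  · next d ds heq =>
      rw [hd] at heq
      injection heq with h1 h2
      subst h2
      simp [List.takeWhile_cons]

lemma pvLines_cons (c : Char) (hc : c ≠ '\n') (rest : List Char) :
    pvLines (c :: rest) = pvMerge [c] (pvLines rest) := by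
  have hd : List.dropWhile (fun x => decide ¬x = '\n') (c :: rest)
      = List.dropWhile (fun x => decide ¬x = '\n') rest := by
    rw [List.dropWhile_cons, if_pos (by simp [hc])]
  have ht : List.takeWhile (fun x => decide ¬x = '\n') (c :: rest)
      = c :: List.takeWhile (fun x => decide ¬x = '\n') rest := by
    rw [List.takeWhile_cons, if_pos (by simp [hc])]
  rw [pvLines, pvLines]
  split
  · next heq =>
      rw [hd] at heq
      split
      · simp [pvMerge]
      · next heq2 => exact absurd (heq.symm.trans heq2) (by simp)
  · next d ds heq =>
      rw [hd] at heq
      split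
      · next heq2 => exact absurd (heq2.symm.trans heq) (by simp)
      · next d2 ds2 heq2 =>
          have hee : (d : Char) :: ds = d2 :: ds2 := heq.symm.trans heq2
          injection hee with h1 h2
          subst h2
          rw [ht]
          simp [pvMerge]

lemma pvLines_nil : pvLines [] = [[]] := by
  rw [pvLines]
  split
  · rfl
  · next heq => simp at heq

lemma pvLines_dropWhile_nil (cs : List Char)
    (hdw : cs.dropWhile (fun x => decide ¬x = '\n') = []) : pvLines cs = [cs] := by
  rw [pvLines]
  split
  · rfl
  · next heq => exact absurd (hdw.symm.trans heq) (by simp)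

lemma pvLines_dropWhile_cons (cs : List Char) (d : Char) (ds : List Char)
    (hdw : cs.dropWhile (fun x => decide ¬x = '\n') = d :: ds) :
    pvLines cs = cs.takeWhile (fun x => decide ¬x = '\n') :: pvLines ds := by
  rw [pvLines]
  split
  · next heq => exact absurd (heq.symm.trans hdw) (by simp)
  · next heq =>
      have hee := heq.symm.trans hdw
      injection hee with h1 h2
      rw [h2]

lemma go_eq (fuel : ℕ) : ∀ (l cur : List Char) (accs : List (List Char)),
    l.length ≤ fuel →
    PySem.Chars.splitOn.go ['\n'] fuel l cur accs
      = accs.reverse ++ pvMerge cur.reverse (pvLines l) := by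
  induction fuel with
  | zero =>
      intro l cur accs hl
      have hl0 : l = [] := by
        cases l with
        | nil => rfl
        | cons a l => simp at hl
      subst hl0
      simp [PySem.Chars.splitOn.go, pvLines_nil, pvMerge]
  | succ f ih =>
      intro l cur accs hl
      cases l with
      | nil => simp [PySem.Chars.splitOn.go, pvLines_nil, pvMerge]
      | cons c rest =>
          rw [PySem.Chars.splitOn.go]
          by_cases hc : c = '\n'
          · subst hc
            rw [if_pos (by simp [List.isPrefixOf])]
            have hr : List.drop ['\n'].length ('\n' :: rest) = rest := by simp
            rw [hr, ih rest [] (cur.reverse :: accs) (by simpa using Nat.le_of_succ_le_succ hl)]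
            rw [pvLines_newline]
            have h1 : pvMerge ([] : List Char).reverse (pvLines rest) = pvLines rest :=
              by simpa using pvMerge_nil (pvLines rest) (pvLines_ne_nil rest)
            rw [h1]
            simp [pvMerge]
          · rw [if_neg (by simp [List.isPrefixOf]; exact fun h => hc h.symm)]
            rw [ih rest (c :: cur) accs (by simpa using Nat.le_of_succ_le_succ hl)]
            rw [pvLines_cons c hc rest]
            simp [pvMerge_merge]

lemma splitOn_eq_pvLines (cs : List Char) :
    PySem.Chars.splitOn cs ['\n'] = pvLines cs := by
  rw [PySem.Chars.splitOn, go_eq (cs.length + 1) cs [] [] (by omega)]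
  simpa using pvMerge_nil (pvLines cs) (pvLines_ne_nil cs)

-- the state after folding a newline-free line from state 0
def pvState (h : List Char) : Nat := if h = [] then 0 else if h = ['.'] then 1 else 2

lemma foldl_step_state2 (line : List Char) (hl : '\n' ∉ line) (out : List Char) :
    line.foldl msgAltStep (out, 2) = (out ++ line, 2) := by
  induction line generalizing out with
  | nil => simp
  | cons c rest ih =>
      have hc : c ≠ '\n' := by intro h; exact hl (h ▸ List.mem_cons_self)
      rw [List.foldl_cons]
      have hstep : msgAltStep (out, 2) c = (out ++ [c], 2) := by
        simp [msgAltStep, hc]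
      rw [hstep, ih (fun h => hl (List.mem_cons_of_mem _ h))]
      simp

lemma foldl_step_state0 (line : List Char) (hl : '\n' ∉ line) (out : List Char) :
    line.foldl msgAltStep (out, 0) = (out ++ line, pvState line) := by
  cases line with
  | nil => simp [pvState]
  | cons c rest =>
      have hc : c ≠ '\n' := by intro h; exact hl (h ▸ List.mem_cons_self)
      have hrest : '\n' ∉ rest := fun h => hl (List.mem_cons_of_mem _ h)
      rw [List.foldl_cons]
      by_cases hdot : c = '.'
      · subst hdot
        have hstep : msgAltStep (out, 0) '.' = (out ++ ['.'], 1) := by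
          simp [msgAltStep]
        rw [hstep]
        cases rest with
        | nil => simp [pvState]
        | cons d ds =>
            have hd : d ≠ '\n' := by intro h; exact hrest (h ▸ List.mem_cons_self)
            rw [List.foldl_cons]
            have hstep2 : msgAltStep (out ++ ['.'], 1) d = (out ++ ['.'] ++ [d], 2) := by
              simp [msgAltStep, hd]
            rw [hstep2, foldl_step_state2 ds (fun h => hrest (List.mem_cons_of_mem _ h))]
            simp [pvState]
      · have hstep : msgAltStep (out, 0) c = (out ++ [c], 2) := by
          simp [msgAltStep, hc, hdot]
        rw [hstep, foldl_step_state2 rest hrest]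
        simp [pvState, hdot]

lemma takeWhile_no_newline (cs : List Char) : '\n' ∉ cs.takeWhile (fun x => decide ¬x = '\n') := by
  intro h
  have := List.mem_takeWhile_imp h
  simp at this

lemma dropWhile_head_false {p : Char → Bool} :
    ∀ (l : List Char) (d : Char) (ds : List Char), l.dropWhile p = d :: ds → p d = false := by
  intro l
  induction l with
  | nil => intro d ds h; simp at h
  | cons a t ih =>
      intro d ds h
      rw [List.dropWhile_cons] at h
      by_cases hpa : p a = true
      · rw [if_pos hpa] at h; exact ih d ds h
      · rw [if_neg hpa] at h
        injection h with h1 h2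
        subst h1
        simpa using hpa

lemma state_emit (h : List Char) (out : List Char) :
    (out ++ h ++ (if pvState h = 1 then ['.'] else [])) ++ ['\n'] = out ++ pvG h := by
  by_cases h1 : h = ['.']
  · subst h1; simp [pvState, pvG]
  · have h2 : pvState h ≠ 1 := by unfold pvState; split_ifs <;> simp_all
    rw [if_neg h2]
    simp [pvG, h1]

lemma alt_main (n : ℕ) : ∀ (cs : List Char), cs.length ≤ n → ∀ (out : List Char),
    (((cs.foldl msgAltStep (out, 0)).1
        ++ (if (cs.foldl msgAltStep (out, 0)).2 = 1 then ['.'] else [])) ++ ['\n'])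
      = out ++ (pvLines cs).flatMap pvG := by
  induction n with
  | zero =>
      intro cs hcs out
      have h0 : cs = [] := by cases cs with | nil => rfl | cons a l => simp at hcs
      subst h0
      simp [pvLines_nil, pvG, pvState]
  | succ n ih =>
      intro cs hcs out
      cases hdw : cs.dropWhile (fun x => decide ¬x = '\n') with
      | nil =>
          have htake := List.takeWhile_append_dropWhile (p := fun x => decide ¬x = '\n') (l := cs)
          rw [hdw, List.append_nil] at htake
          have hno : '\n' ∉ cs := by
            intro hm
            rw [← htake] at hm
            exact takeWhile_no_newline cs hm
          rw [pvLines_dropWhile_nil cs hdw, foldl_step_state0 cs hno out]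
          have := state_emit cs out
          simp only [List.flatMap_cons, List.flatMap_nil, List.append_nil]
          simpa using this
      | cons d ds =>
          have htake := List.takeWhile_append_dropWhile (p := fun x => decide ¬x = '\n') (l := cs)
          have hd : d = '\n' := by
            have h3 := dropWhile_head_false cs d ds hdw
            simpa using h3
          have hcs' : cs = cs.takeWhile (fun x => decide ¬x = '\n') ++ '\n' :: ds := by
            conv_lhs => rw [← htake]
            rw [hdw, hd]
          rw [pvLines_dropWhile_cons cs d ds hdw]
          conv_lhs => rw [hcs']
          rw [List.foldl_append, foldl_step_state0 _ (takeWhile_no_newline cs) out, List.foldl_cons]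
          have hstep : msgAltStep (out ++ cs.takeWhile (fun x => decide ¬x = '\n'),
                pvState (cs.takeWhile (fun x => decide ¬x = '\n'))) '\n'
              = ((out ++ cs.takeWhile (fun x => decide ¬x = '\n')
                  ++ (if pvState (cs.takeWhile (fun x => decide ¬x = '\n')) = 1 then ['.'] else [])) ++ ['\n'], 0) := by
            simp [msgAltStep]
          rw [hstep]
          have hlen : ds.length ≤ n := by
            have hlcs := congrArg List.length hcs'
            simp at hlcs
            omega
          rw [ih ds hlen _]
          rw [state_emit]
          simp

lemma a_eq (cs : List Char) :
    messageSMTP (String.ofList cs) = String.ofList ((pvLines cs).flatMap pvG) := by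
  rw [messageSMTP]
  have hlist : (String.ofList cs).toList = cs := by simp
  rw [hlist]
  rw [PySem.List.foldl_pyRange_pyGetD (PySem.Chars.splitOn cs ['\n']) []
        (fun acc x => if x = ['.'] then acc ++ ['.', '.', '\n'] else acc ++ x ++ ['\n']) [] (le_refl 0)]
  rw [splitOn_eq_pvLines]
  simp only [Int.toNat_zero, List.drop_zero]
  have hfold : ∀ (L : List (List Char)) (acc : List Char),
      L.foldl (fun acc x => if x = ['.'] then acc ++ ['.', '.', '\n'] else acc ++ x ++ ['\n']) acc
        = acc ++ L.flatMap pvG := by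
    intro L
    induction L with
    | nil => intro acc; simp
    | cons x xs ihx =>
        intro acc
        rw [List.foldl_cons, ihx]
        by_cases hx : x = ['.']
        · subst hx; simp [pvG]
        · simp [hx, pvG]
  rw [hfold]
  simp

-- ===== VERDICT (by name: the statement is the Claim_ definition above) =====
theorem messageSMTP_spec : Claim_equal_messageSMTP := by
  intro message _
  unfold Spec_messageSMTP
  have h1 : message = String.ofList message.toList := by simp
  rw [h1, a_eq message.toList, messageSMTP_alt]
  have hlist : (String.ofList message.toList).toList = message.toList := by simp
  rw [hlist]
  exact congrArg String.ofList
    ((alt_main message.toList.length message.toList (le_refl _) []).trans (by simp)).symm
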